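-- pv_equiv track=rewrite | github.com/GenryEden/kpolyakovName | 3788.py | f
-- ===== SOURCE A (Python) =====
-- def f(x):
-- 	k = x % 5
-- 	a = 0
-- 	b = 0
-- 	while x > 0:
-- 		d = x % 5
-- 		if d == k:
-- 			a += 1
-- 		b += d
-- 		x //= 5
-- 	return a, b
-- ===== SOURCE B (Python) =====
-- def f(x):
--     k = x % 5
--     if x <= 0:
--         return (0, 0)
--     a = 0
--     t = 0
--     p = 1
--     while p <= x:
--         q = x // p
--         if q % 5 == k:
--             a += 1
--         t += q
--         p *= 5
--     return (a, 5 * x - 4 * t)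
-- ===== Notes on version B (the rewrite author's own statement) =====
-- stated objective: alternative
-- what changed: B never mutates x or extracts digits one by one: it walks successive powers of the base, counts quotient positions whose low digit equals k, accumulates the total t of the quotients, and recovers the digit sum in closed form from the Legendre-style identity digitsum(x) = base*x - (base-1)*t instead of adding digits.
import Mathlib
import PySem

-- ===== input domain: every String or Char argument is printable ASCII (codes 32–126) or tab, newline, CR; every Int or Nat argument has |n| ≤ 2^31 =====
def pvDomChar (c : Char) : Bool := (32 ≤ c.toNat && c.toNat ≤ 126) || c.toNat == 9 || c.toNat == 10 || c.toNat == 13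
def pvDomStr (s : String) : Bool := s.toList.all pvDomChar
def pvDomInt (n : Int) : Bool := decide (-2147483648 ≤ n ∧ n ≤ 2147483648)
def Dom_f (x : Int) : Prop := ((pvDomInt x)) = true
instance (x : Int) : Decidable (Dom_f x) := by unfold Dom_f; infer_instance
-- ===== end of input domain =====

-- B walks powers of 5 without mutating x and gets the digit sum from the closed-form
-- identity digitsum_5(x) = 5*x - 4*Σ x//5^i; a genuinely different algorithm, same cost.

-- ===== PORT A =====
-- A's while-loop: state (x, a, b), k fixed
def fLoop (x k a b : Int) : Int × Int :=
  if h : x > 0 then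
    let d := PySem.Int.mod x 5
    fLoop (PySem.Int.floordiv x 5) k (if d = k then a + 1 else a) (b + d)
  else (a, b)
termination_by x.toNat
decreasing_by
  have h5 : PySem.Int.floordiv x 5 = x / 5 := PySem.Int.floordiv_eq_ediv_of_pos (by omega)
  rw [h5]; omega

def f (x : Int) : Int × Int :=
  let k := PySem.Int.mod x 5
  fLoop x k 0 0

-- ===== PORT B =====
-- B's while-loop over powers p = 1, 5, 25, ...: state (p, a, t), x and k fixed
def bLoop (x k p a t : Int) : Int × Int :=
  if h : 0 < p ∧ p ≤ x then
    let q := PySem.Int.floordiv x p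
    bLoop x k (p * 5) (if PySem.Int.mod q 5 = k then a + 1 else a) (t + q)
  else (a, t)
termination_by (x + 1 - p).toNat
decreasing_by omega

def f_alt (x : Int) : Int × Int :=
  let k := PySem.Int.mod x 5
  if x ≤ 0 then (0, 0)
  else
    let (a, t) := bLoop x k 1 0 0
    (a, 5 * x - 4 * t)

-- ===== PRECONDITION & SPEC =====
def Spec_f (x : Int) (out : Int × Int) : Prop := out = f_alt x
instance (x : Int) (out : Int × Int) : Decidable (Spec_f x out) := by unfold Spec_f; infer_instance

-- ===== CLAIM (what is proved, stated in full; the proofs are below) =====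
def Claim_equal_f : Prop := ∀ (x : Int), Dom_f x → Spec_f x (f x)

-- ===== LEMMAS AND PROOFS =====

-- proof-only reference functions on the digit stream of y (LSB first):
-- cnt k y = number of base-5 digits of y equal to k; dsum y = their sum; tsumPow y = Σ_i y//5^i while positive
def cnt (k y : Int) : Int :=
  if h : y > 0 then (if y % 5 = k then 1 else 0) + cnt k (y / 5) else 0
termination_by y.toNat
decreasing_by omega

def dsum (y : Int) : Int :=
  if h : y > 0 then y % 5 + dsum (y / 5) else 0
termination_by y.toNat
decreasing_by omega

def tsumPow (y : Int) : Int :=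
  if h : y > 0 then y + tsumPow (y / 5) else 0
termination_by y.toNat
decreasing_by omega

theorem fLoop_eq : ∀ (n : Nat) (y : Int), y.toNat ≤ n → ∀ (k a b : Int),
    fLoop y k a b = (a + cnt k y, b + dsum y) := by
  intro n
  induction n with
  | zero =>
    intro y hy k a b
    have h : ¬ y > 0 := by omega
    rw [fLoop, cnt, dsum]; simp [h]
  | succ n ih =>
    intro y hy k a b
    by_cases h : y > 0
    · have h5 : PySem.Int.floordiv y 5 = y / 5 := PySem.Int.floordiv_eq_ediv_of_pos (by omega)
      have hm : PySem.Int.mod y 5 = y % 5 := PySem.Int.mod_eq_emod_of_pos (by omega)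
      have hlt : (y / 5).toNat ≤ n := by omega
      rw [fLoop, cnt, dsum]
      simp only [h, dite_true, h5, hm]
      rw [ih _ hlt]
      refine Prod.ext ?_ (by simp; ring)
      simp only
      split_ifs <;> ring
    · rw [fLoop, cnt, dsum]; simp [h]

theorem dsum_eq : ∀ (n : Nat) (y : Int), y.toNat ≤ n → 0 ≤ y → dsum y = 5 * y - 4 * tsumPow y := by
  intro n
  induction n with
  | zero =>
    intro y hy h0
    have h : ¬ y > 0 := by omega
    rw [dsum, tsumPow]; simp [h]; omega
  | succ n ih =>
    intro y hy h0
    by_cases h : y > 0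
    · have hq : 0 ≤ y / 5 := by positivity
      have hlt : (y / 5).toNat ≤ n := by omega
      rw [dsum, tsumPow]
      simp only [h, dite_true]
      rw [ih _ hlt hq]
      have := Int.emod_add_mul_ediv y 5
      omega
    · rw [dsum, tsumPow]; simp [h]; omega

theorem bLoop_eq (x : Int) (hx : 0 ≤ x) : ∀ (n : Nat) (p : Int), (x + 1 - p).toNat ≤ n → 0 < p →
    ∀ (k a t : Int), bLoop x k p a t = (a + cnt k (x / p), t + tsumPow (x / p)) := by
  intro n
  induction n with
  | zero =>
    intro p hn hp k a t
    have hpx : ¬ p ≤ x := by omega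
    have hq : x / p = 0 := Int.ediv_eq_zero_of_lt hx (by omega)
    rw [bLoop, hq, cnt, tsumPow]
    simp [hpx]
  | succ n ih =>
    intro p hn hp k a t
    by_cases hpx : p ≤ x
    · have h5 : PySem.Int.floordiv x p = x / p := PySem.Int.floordiv_eq_ediv_of_pos hp
      have hq0 : 0 < x / p := (Int.le_ediv_iff_mul_le hp).mpr (by omega)
      have hm : PySem.Int.mod (x / p) 5 = (x / p) % 5 := PySem.Int.mod_eq_emod_of_pos (by omega)
      have hdd : x / (p * 5) = (x / p) / 5 := (Int.ediv_ediv_of_nonneg (by omega)).symm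
      have hn' : (x + 1 - p * 5).toNat ≤ n := by omega
      rw [bLoop]
      simp only [hp, hpx, and_self, dite_true, h5, hm]
      rw [ih _ hn' (by omega), hdd]
      conv_rhs => rw [cnt, tsumPow]
      simp only [hq0, dite_true]
      refine Prod.ext ?_ (by simp; ring)
      simp only
      split_ifs <;> ring
    · have hq : x / p = 0 := Int.ediv_eq_zero_of_lt hx (by omega)
      rw [bLoop, hq, cnt, tsumPow]
      simp [hpx]

-- ===== VERDICT (by name: the statement is the Claim_ definition above) =====
theorem f_spec : Claim_equal_f := by
  intro x _
  unfold Spec_f f f_alt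
  by_cases hx : x ≤ 0
  · have h : ¬ x > 0 := by omega
    simp only [hx, if_true]
    rw [fLoop]
    simp [h]
  · have hx0 : (0:Int) ≤ x := by omega
    simp only [hx, if_false]
    rw [bLoop_eq x hx0 (x + 1 - 1).toNat 1 le_rfl one_pos,
        fLoop_eq x.toNat x le_rfl]
    simp only [Int.ediv_one, zero_add]
    rw [dsum_eq x.toNat x le_rfl hx0]
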